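-- pv_equiv track=rewrite | github.com/ENOBANBU/Career-quiz | career_ting.py | match_careers
-- ===== SOURCE A (Python) =====
-- def match_careers(careers, scores):
--     best_matches = []
--     min_diff = float('inf')
--
--     for career in careers:
--         diff = sum(abs(scores[category] - career[category]) for category in scores)
--
--         if diff < min_diff:
--             best_matches = [career]
--             min_diff = diff
--         elif diff == min_diff:
--             best_matches.append(career)
--
--     return best_matches
-- ===== SOURCE B (Python) =====
-- def match_careers(careers, scores):
--     diffs = [sum(abs(scores[c] - career[c]) for c in scores) for career in careers]
--     if not diffs:
--         return []
--     m = min(diffs)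
--     return [career for career, d in zip(careers, diffs) if d == m]
-- ===== Notes on version B (the rewrite author's own statement) =====
-- stated objective: simpler
-- what changed: Replaces A's single fused min-tracking scan with three separate passes: map each career to its diff, take the minimum of the diff list, then filter the careers whose diff equals it (ties keep input order).
import Mathlib
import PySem

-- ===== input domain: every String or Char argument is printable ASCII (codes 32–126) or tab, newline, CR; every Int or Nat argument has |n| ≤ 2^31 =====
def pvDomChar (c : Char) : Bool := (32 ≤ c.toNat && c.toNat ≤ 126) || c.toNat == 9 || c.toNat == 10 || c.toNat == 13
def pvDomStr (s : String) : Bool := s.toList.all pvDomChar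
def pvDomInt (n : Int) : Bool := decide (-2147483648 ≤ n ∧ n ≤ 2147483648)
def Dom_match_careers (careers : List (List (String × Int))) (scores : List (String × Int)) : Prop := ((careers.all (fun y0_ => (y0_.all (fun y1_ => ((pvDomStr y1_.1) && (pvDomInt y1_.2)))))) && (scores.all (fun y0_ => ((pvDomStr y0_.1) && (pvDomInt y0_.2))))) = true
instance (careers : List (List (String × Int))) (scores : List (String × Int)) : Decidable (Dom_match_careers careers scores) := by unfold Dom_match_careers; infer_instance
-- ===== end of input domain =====

-- B is a simpler three-pass decomposition (diff list, min, filter) of A's fused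
-- min-tracking scan; equal return values on Pre_ (every scores key present in each career).

-- shared dict-lookup helper: d[k] with default 0 (exact under Pre_, where the key is present)
def pvLook (d : List (String × Int)) (k : String) : Int :=
  match d.find? (fun p => p.1 == k) with
  | some p => p.2
  | none => 0

-- diff = sum(abs(scores[c] - career[c]) for c in scores)
def pvDiff (scores career : List (String × Int)) : Int :=
  scores.foldl (fun acc p => acc + |pvLook scores p.1 - pvLook career p.1|) 0

-- ===== PORT A =====
def match_careers (careers : List (List (String × Int))) (scores : List (String × Int)) : List (List (String × Int)) :=
  -- min_diff = float('inf') is modelled as the Option state `none`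
  (careers.foldl
    (fun (st : List (List (String × Int)) × Option Int) career =>
      let diff := pvDiff scores career
      match st.2 with
      | none => ([career], some diff)
      | some m =>
        if diff < m then ([career], some diff)
        else if diff = m then (st.1 ++ [career], some m)
        else st)
    ([], none)).1

-- ===== PORT B =====
def match_careers_alt (careers : List (List (String × Int))) (scores : List (String × Int)) : List (List (String × Int)) :=
  let diffs := careers.map (fun career => pvDiff scores career)
  match PySem.List.min? diffs (fun x => x) with
  | none => []
  | some m => ((careers.zip diffs).filter (fun p => p.2 == m)).map (fun p => p.1)

-- ===== PRECONDITION & SPEC =====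
-- Pre_ excludes inputs where some career lacks a key of scores: there Python A raises KeyError.
def Pre_match_careers (careers : List (List (String × Int))) (scores : List (String × Int)) : Prop :=
  ∀ career ∈ careers, ∀ p ∈ scores, (career.find? (fun q => q.1 == p.1)).isSome
instance (careers : List (List (String × Int))) (scores : List (String × Int)) : Decidable (Pre_match_careers careers scores) := by unfold Pre_match_careers; infer_instance
def pvWitness_match_careers : (List (List (String × Int))) × (List (String × Int)) :=
  ([[("a", 1), ("b", 2)], [("a", 3), ("b", 0)]], [("a", 2), ("b", 2)])

def Spec_match_careers (careers : List (List (String × Int))) (scores : List (String × Int)) (out : List (List (String × Int))) : Prop := out = match_careers_alt careers scores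
instance (careers : List (List (String × Int))) (scores : List (String × Int)) (out : List (List (String × Int))) : Decidable (Spec_match_careers careers scores out) := by unfold Spec_match_careers; infer_instance

-- ===== CLAIM (what is proved, stated in full; the proofs are below) =====
def Claim_equal_match_careers : Prop := ∀ (careers : List (List (String × Int))) (scores : List (String × Int)), Dom_match_careers careers scores → Pre_match_careers careers scores → Spec_match_careers careers scores (match_careers careers scores)

-- ===== LEMMAS AND PROOFS =====

theorem foldl_min_le_init (f : List (String × Int) → Int) (cs : List (List (String × Int))) (m : Int) :
    cs.foldl (fun a c => min a (f c)) m ≤ m := by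
  induction cs generalizing m with
  | nil => simp
  | cons c t ih => exact le_trans (ih (min m (f c))) (min_le_left _ _)

theorem foldA_some (scores : List (String × Int)) (cs : List (List (String × Int)))
    (best : List (List (String × Int))) (m : Int) :
    cs.foldl
      (fun (st : List (List (String × Int)) × Option Int) career =>
        let diff := pvDiff scores career
        match st.2 with
        | none => ([career], some diff)
        | some m =>
          if diff < m then ([career], some diff)
          else if diff = m then (st.1 ++ [career], some m)
          else st)
      (best, some m)
    = ((if cs.foldl (fun a c => min a (pvDiff scores c)) m < m then [] else best)
        ++ cs.filter (fun c => pvDiff scores c == cs.foldl (fun a c => min a (pvDiff scores c)) m),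
       some (cs.foldl (fun a c => min a (pvDiff scores c)) m)) := by
  induction cs generalizing best m with
  | nil => simp
  | cons c t ih =>
    simp only [List.foldl_cons, List.filter_cons]
    have hM := foldl_min_le_init (fun career => pvDiff scores career) t (min m (pvDiff scores c))
    by_cases h1 : pvDiff scores c < m
    · have hmin : min m (pvDiff scores c) = pvDiff scores c := min_eq_right (le_of_lt h1)
      rw [hmin] at hM
      simp only [hmin, if_pos h1]
      rw [ih]
      have hlt : t.foldl (fun a c => min a (pvDiff scores c)) (pvDiff scores c) < m :=
        lt_of_le_of_lt hM h1
      rw [if_pos hlt]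
      by_cases h2 : pvDiff scores c = t.foldl (fun a c => min a (pvDiff scores c)) (pvDiff scores c)
      · have hnlt : ¬ t.foldl (fun a c => min a (pvDiff scores c)) (pvDiff scores c) < pvDiff scores c := by omega
        simp only [if_neg hnlt, beq_iff_eq, if_pos h2, List.singleton_append, List.nil_append]
      · have hlt2 : t.foldl (fun a c => min a (pvDiff scores c)) (pvDiff scores c) < pvDiff scores c := by omega
        simp only [if_pos hlt2, beq_iff_eq, if_neg h2, List.nil_append]
    · have hmin : min m (pvDiff scores c) = m := min_eq_left (by omega)
      rw [hmin] at hM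
      simp only [hmin, if_neg h1]
      by_cases h2 : pvDiff scores c = m
      · simp only [if_pos h2]
        rw [ih]
        by_cases h3 : t.foldl (fun a c => min a (pvDiff scores c)) m < m
        · have hne2 : ¬ pvDiff scores c = t.foldl (fun a c => min a (pvDiff scores c)) m := by omega
          simp only [if_pos h3, beq_iff_eq, if_neg hne2, List.nil_append]
        · have hEq : pvDiff scores c = t.foldl (fun a c => min a (pvDiff scores c)) m := by omega
          simp only [if_neg h3, beq_iff_eq, if_pos hEq, List.append_assoc, List.singleton_append]
      · simp only [if_neg h2]
        rw [ih]
        have hne2 : ¬ pvDiff scores c = t.foldl (fun a c => min a (pvDiff scores c)) m := by omega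
        simp only [beq_iff_eq, if_neg hne2]

theorem filter_zip_map (f : List (String × Int) → Int) (cs : List (List (String × Int))) (m : Int) :
    (((cs.zip (cs.map f)).filter (fun p => p.2 == m)).map (fun p => p.1))
      = cs.filter (fun c => f c == m) := by
  induction cs with
  | nil => rfl
  | cons c t ih =>
    simp only [List.map_cons, List.zip_cons_cons, List.filter_cons]
    by_cases h : f c == m
    · simp [h, ih]
    · simp [h, ih]

-- ===== VERDICT (by name: the statement is the Claim_ definition above) =====
theorem match_careers_spec : Claim_equal_match_careers := by
  intro careers scores _ _
  unfold Spec_match_careers match_careers match_careers_alt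
  dsimp only
  cases careers with
  | nil => rfl
  | cons c t =>
    have hmap : List.map (fun career => pvDiff scores career) (c :: t)
        = pvDiff scores c :: List.map (fun career => pvDiff scores career) t := rfl
    rw [hmap, PySem.List.min?_id_cons, List.foldl_map, ← hmap]
    simp only []
    rw [filter_zip_map (fun career => pvDiff scores career)]
    simp only [List.foldl_cons]
    rw [foldA_some]
    simp only [List.filter_cons]
    have hM := foldl_min_le_init (fun career => pvDiff scores career) t (pvDiff scores c)
    by_cases h : t.foldl (fun a career => min a (pvDiff scores career)) (pvDiff scores c) < pvDiff scores c
    · have hne : ¬ pvDiff scores c = t.foldl (fun a career => min a (pvDiff scores career)) (pvDiff scores c) := by omega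
      simp only [if_pos h, beq_iff_eq, if_neg hne, List.nil_append]
    · have heq : pvDiff scores c = t.foldl (fun a career => min a (pvDiff scores career)) (pvDiff scores c) := by omega
      simp only [if_neg h, beq_iff_eq, if_pos heq, List.singleton_append]
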